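-- pv_equiv track=rewrite | github.com/Himaja63/cp_problems | 03-nth_pronicnumber-Python/nthpronicnumber.py | isPronicnumber
-- ===== SOURCE A (Python) =====
-- def isPronicnumber(n):
--     k = 1
--     flag = 0
--     if n == 0:
--         return True
--     else:
--         while (k < n):
--             pro = k * (k+1)
--             if(pro == n):
--                 return True
--                 break
--             else:
--                 k = k+1
--
--         else:
--             return False
-- ===== SOURCE B (Python) =====
-- import math
--
-- def isPronicnumber(n):
--     if n < 0:
--         return False
--     m = math.isqrt(n)
--     return m * (m + 1) == n
-- ===== Notes on version B (the rewrite author's own statement) =====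
-- stated objective: faster
-- what changed: Replaces the linear incremental search for k with k*(k+1)==n by a single integer-square-root closed-form check m=isqrt(n); m*(m+1)==n.
import Mathlib
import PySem

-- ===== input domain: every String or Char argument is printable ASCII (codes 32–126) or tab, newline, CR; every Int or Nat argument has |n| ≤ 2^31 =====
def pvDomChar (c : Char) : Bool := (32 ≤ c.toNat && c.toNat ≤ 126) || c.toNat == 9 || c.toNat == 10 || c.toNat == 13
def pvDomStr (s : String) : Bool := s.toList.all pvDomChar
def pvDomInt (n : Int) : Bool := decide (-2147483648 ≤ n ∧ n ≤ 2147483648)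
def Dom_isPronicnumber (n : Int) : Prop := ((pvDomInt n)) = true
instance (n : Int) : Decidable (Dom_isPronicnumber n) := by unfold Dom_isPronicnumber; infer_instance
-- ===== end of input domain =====

-- B replaces A's linear search (k = 1,2,… while k < n, testing k*(k+1) == n) by the
-- closed-form check m = isqrt(n); m*(m+1) == n (guarding n < 0), which a timing run measured faster.


-- ===== PORT A =====
-- the 'while (k < n)' loop of A: try k, k+1, … while k < n; the trailing 'else: return False'
def pronicLoop (n : Int) (k : Int) : Bool :=
  if _h : k < n then
    if k * (k + 1) == n then true else pronicLoop n (k + 1)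
  else false
termination_by (n - k).toNat
decreasing_by omega

def isPronicnumber (n : Int) : Bool :=
  if n == 0 then true else pronicLoop n 1

-- ===== PORT B =====
-- math.isqrt(n) = Nat.sqrt on the nonnegative branch
def isPronicnumber_alt (n : Int) : Bool :=
  if n < 0 then false
  else
    let m : Int := (Nat.sqrt n.toNat : Int)
    m * (m + 1) == n

-- ===== PRECONDITION & SPEC =====
def Spec_isPronicnumber (n : Int) (out : Bool) : Prop := out = isPronicnumber_alt n
instance (n : Int) (out : Bool) : Decidable (Spec_isPronicnumber n out) := by unfold Spec_isPronicnumber; infer_instance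

-- ===== CLAIM (what is proved, stated in full; the proofs are below) =====
def Claim_equal_isPronicnumber : Prop := ∀ (n : Int), Dom_isPronicnumber n → Spec_isPronicnumber n (isPronicnumber n)

-- ===== LEMMAS AND PROOFS =====

-- A's loop finds a root of j*(j+1) = n in [k, n) iff one exists
lemma pronicLoop_iff (n k : Int) :
    pronicLoop n k = true ↔ ∃ j : Int, k ≤ j ∧ j < n ∧ j * (j + 1) = n := by
  fun_induction pronicLoop n k with
  | case1 k h hpro =>
      simp only [beq_iff_eq] at hpro
      simp only [true_iff]
      exact ⟨k, le_refl k, h, hpro⟩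
  | case2 k h hpro ih =>
      simp only [beq_iff_eq] at hpro
      rw [ih]
      constructor
      · rintro ⟨j, hj1, hj2, hj3⟩; exact ⟨j, by omega, hj2, hj3⟩
      · rintro ⟨j, hj1, hj2, hj3⟩
        refine ⟨j, ?_, hj2, hj3⟩
        rcases lt_or_ge k j with h' | h'
        · omega
        · exfalso
          have : j = k := by omega
          exact hpro (this ▸ hj3)
  | case3 k h =>
      constructor
      · intro hcontra; exact absurd hcontra (by simp)
      · rintro ⟨j, hj1, hj2, _⟩; exfalso; omega

lemma alt_iff (n : Int) :
    isPronicnumber_alt n = true ↔ ∃ j : Int, 0 ≤ j ∧ j * (j + 1) = n := by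
  unfold isPronicnumber_alt
  split_ifs with hn
  · simp only [false_iff]
    rintro ⟨j, hj0, hj⟩; nlinarith
  · rw [not_lt] at hn
    simp only [beq_iff_eq]
    constructor
    · intro h; exact ⟨(Nat.sqrt n.toNat : Int), by positivity, h⟩
    · rintro ⟨j, hj0, hj⟩
      -- j = sqrt n.toNat
      have hjc : (j.toNat : Int) = j := Int.toNat_of_nonneg hj0
      have hnc : (n.toNat : Int) = n := Int.toNat_of_nonneg hn
      have hs : Nat.sqrt n.toNat = j.toNat := by
        have h1 : j.toNat ≤ Nat.sqrt n.toNat := by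
          rw [Nat.le_sqrt]
          have : (j.toNat * j.toNat : Int) ≤ (n.toNat : Int) := by
            push_cast [hjc, hnc]; nlinarith
          exact_mod_cast this
        have h2 : Nat.sqrt n.toNat < j.toNat + 1 := by
          rw [Nat.sqrt_lt]
          have : (n.toNat : Int) < ((j.toNat + 1) * (j.toNat + 1) : Int) := by
            push_cast [hjc, hnc]; nlinarith
          exact_mod_cast this
        omega
      rw [hs, hjc]; exact hj

-- ===== VERDICT (by name: the statement is the Claim_ definition above) =====
theorem isPronicnumber_spec : Claim_equal_isPronicnumber := by
  intro n _
  unfold Spec_isPronicnumber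
  unfold isPronicnumber
  split_ifs with h0
  · simp only [beq_iff_eq] at h0
    subst h0
    decide
  · simp only [beq_iff_eq] at h0
    rw [Bool.eq_iff_iff, pronicLoop_iff, alt_iff]
    constructor
    · rintro ⟨j, hj1, hj2, hj3⟩; exact ⟨j, by omega, hj3⟩
    · rintro ⟨j, hj0, hj⟩
      have hj1 : 1 ≤ j := by
        rcases eq_or_lt_of_le hj0 with h | h
        · exfalso; apply h0; rw [← hj, ← h]; ring
        · omega
      refine ⟨j, hj1, ?_, hj⟩
      nlinarith
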